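-- pv_equiv track=rewrite | github.com/Meduty/merlins-aitomaton | merlinAI_lib.py | _ordered_color_keys
-- ===== SOURCE A (Python) =====
-- CANONICAL_COLOR_ORDER = ["white", "blue", "black", "red", "green", "colorless"]
--
-- def _ordered_color_keys(keys: list[str] | set[str]) -> list[str]:
--     order_index = {c: i for i, c in enumerate(CANONICAL_COLOR_ORDER)}
--     keys = list(keys)
--     known = [k for k in keys if k in order_index]
--     known.sort(key=lambda k: order_index[k])
--     others = [k for k in keys if k not in order_index]
--     others.sort()
--     return known + others
-- ===== SOURCE B (Python) =====
-- CANONICAL_COLOR_ORDER = ["white", "blue", "black", "red", "green", "colorless"]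
--
-- def _ordered_color_keys(keys):
--     keys = list(keys)
--     result = []
--     for c in CANONICAL_COLOR_ORDER:
--         result.extend([c] * keys.count(c))
--     result.extend(sorted(k for k in keys if k not in CANONICAL_COLOR_ORDER))
--     return result
-- ===== Notes on version B (the rewrite author's own statement) =====
-- stated objective: alternative
-- what changed: A builds an order_index dict, partitions keys into known/unknown and sorts each half; B builds no dict and never sorts the known keys at all: it walks the six canonical colors emitting each one keys.count(c) times (counting, not sorting), then appends the sorted unknown keys.
import Mathlib
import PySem

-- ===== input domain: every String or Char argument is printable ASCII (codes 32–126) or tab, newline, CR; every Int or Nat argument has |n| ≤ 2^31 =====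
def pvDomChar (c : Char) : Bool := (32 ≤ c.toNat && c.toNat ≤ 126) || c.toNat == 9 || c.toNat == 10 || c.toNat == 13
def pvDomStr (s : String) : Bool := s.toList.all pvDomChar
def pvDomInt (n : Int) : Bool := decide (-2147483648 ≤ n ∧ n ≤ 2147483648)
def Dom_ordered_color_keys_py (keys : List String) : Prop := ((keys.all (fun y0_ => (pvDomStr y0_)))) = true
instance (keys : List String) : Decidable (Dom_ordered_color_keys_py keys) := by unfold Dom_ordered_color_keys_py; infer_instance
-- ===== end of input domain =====

-- B builds no dict and never sorts the known keys: it walks the six canonical colors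
-- emitting each one count-many times (counting replaces sorting), then appends the
-- sorted unknown keys; objective: alternative.

-- ===== PORT A =====
def CANONICAL_COLOR_ORDER : List String := ["white", "blue", "black", "red", "green", "colorless"]

def ordered_color_keys_py (keys : List String) : List String :=
  let order_index : PySem.Dict String Int :=
    (PySem.List.enumerate CANONICAL_COLOR_ORDER 0).foldl (fun d p => d.insert p.2 p.1) PySem.Dict.empty
  let known := keys.filter (fun k => order_index.contains k)
  -- order_index[k]: every k in known is a dict key, so the .getD default is never consulted
  let knownSorted := PySem.List.sorted known (fun k => order_index.getD k 0)
  let others := keys.filter (fun k => !order_index.contains k)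
  let othersSorted := PySem.List.sorted others (fun k => k)
  knownSorted ++ othersSorted

-- ===== PORT B =====
def ordered_color_keys_py_alt (keys : List String) : List String :=
  -- for c in CANONICAL_COLOR_ORDER: result.extend([c] * keys.count(c))
  let result : List String :=
    CANONICAL_COLOR_ORDER.foldl (fun acc c => acc ++ List.replicate (PySem.List.count keys c) c) []
  -- result.extend(sorted(k for k in keys if k not in CANONICAL_COLOR_ORDER))
  result ++ PySem.List.sorted (keys.filter (fun k => !(CANONICAL_COLOR_ORDER.contains k))) (fun k => k)

-- ===== PRECONDITION & SPEC =====
def Spec_ordered_color_keys_py (keys : List String) (out : List String) : Prop := out = ordered_color_keys_py_alt keys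
instance (keys : List String) (out : List String) : Decidable (Spec_ordered_color_keys_py keys out) := by unfold Spec_ordered_color_keys_py; infer_instance

-- ===== CLAIM (what is proved, stated in full; the proofs are below) =====
def Claim_equal_ordered_color_keys_py : Prop := ∀ (keys : List String), Dom_ordered_color_keys_py keys → Spec_ordered_color_keys_py keys (ordered_color_keys_py keys)

-- ===== LEMMAS AND PROOFS =====

-- the order_index dict A builds (proof-side name)
def pvOrderIndex : PySem.Dict String Int :=
  (PySem.List.enumerate CANONICAL_COLOR_ORDER 0).foldl (fun d p => d.insert p.2 p.1) PySem.Dict.empty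

-- the common sort key both results are ordered by, valued in the lexicographic product
def pvKey (k : String) : Lex (Int × String) := toLex (pvOrderIndex.getD k 6, k)

lemma pvA_eq (keys : List String) :
    ordered_color_keys_py keys =
      PySem.List.sorted (keys.filter (fun k => pvOrderIndex.contains k)) (fun k => pvOrderIndex.getD k 0) ++
      PySem.List.sorted (keys.filter (fun k => !pvOrderIndex.contains k)) (fun k => k) := rfl

lemma pvB_eq (keys : List String) :
    ordered_color_keys_py_alt keys =
      CANONICAL_COLOR_ORDER.flatMap (fun c => List.replicate (keys.count c) c) ++
      PySem.List.sorted (keys.filter (fun k => !(CANONICAL_COLOR_ORDER.contains k))) (fun k => k) := by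
  show CANONICAL_COLOR_ORDER.foldl (fun acc c => acc ++ List.replicate (PySem.List.count keys c) c) [] ++ _ = _
  rw [PySem.List.foldl_append_eq_flatMap]
  simp [PySem.List.count_eq]

lemma pvKey_injective : Function.Injective pvKey := by
  intro a b h
  exact congrArg (fun p => (ofLex p).2) h

lemma pvContains_iff (k : String) :
    pvOrderIndex.contains k = true ↔ k ∈ CANONICAL_COLOR_ORDER := by
  rw [PySem.Dict.contains_iff_mem_keys]
  show k ∈ PySem.Dict.keys pvOrderIndex ↔ _
  have : PySem.Dict.keys pvOrderIndex = CANONICAL_COLOR_ORDER := by decide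
  rw [this]

lemma pvGetD_lt_six (k : String) (h : pvOrderIndex.contains k = true) :
    pvOrderIndex.getD k 6 < 6 := by
  have hm := (pvContains_iff k).mp h
  fin_cases hm <;> decide

lemma pvGetD_eq_six (k : String) (h : pvOrderIndex.contains k = false) :
    pvOrderIndex.getD k 6 = 6 := by
  exact PySem.Dict.getD_of_not_contains _ _ h

lemma pvGetD_zero_eq (k : String) (h : pvOrderIndex.contains k = true) :
    pvOrderIndex.getD k 0 = pvOrderIndex.getD k 6 := by
  have hm := (pvContains_iff k).mp h
  fin_cases hm <;> decide

lemma pvGetD_inj (a b : String) (ha : pvOrderIndex.contains a = true)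
    (hb : pvOrderIndex.contains b = true)
    (h : pvOrderIndex.getD a 6 = pvOrderIndex.getD b 6) : a = b := by
  have hma := (pvContains_iff a).mp ha
  have hmb := (pvContains_iff b).mp hb
  fin_cases hma <;> fin_cases hmb <;> first | rfl | (exfalso; revert h; decide)

lemma pvKey_le_of (a b : String)
    (h : pvOrderIndex.getD a 6 < pvOrderIndex.getD b 6 ∨
         (pvOrderIndex.getD a 6 = pvOrderIndex.getD b 6 ∧ a ≤ b)) :
    pvKey a ≤ pvKey b := by
  rcases h with h | ⟨h1, h2⟩
  · exact le_of_lt (Prod.Lex.lt_iff.mpr (Or.inl h))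
  · rcases lt_or_eq_of_le h2 with h2 | h2
    · exact le_of_lt (Prod.Lex.lt_iff.mpr (Or.inr ⟨h1, h2⟩))
    · subst h2; exact le_rfl

-- membership / count facts about B's counting part
lemma pvCount_flatMap (keys L : List String) (hnd : L.Nodup) (s : String) :
    (L.flatMap (fun c => List.replicate (keys.count c) c)).count s
      = if s ∈ L then keys.count s else 0 := by
  induction L with
  | nil => simp
  | cons c L ih =>
    have hnd' := (List.nodup_cons.mp hnd).2
    have hcn := (List.nodup_cons.mp hnd).1
    rw [List.flatMap_cons, List.count_append, ih hnd']
    by_cases hsc : s = c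
    · subst hsc
      simp [hcn]
    · simp [List.count_replicate, hsc, Ne.symm hsc]

lemma pvCount_filter (keys : List String) (p : String → Bool) (s : String) :
    (keys.filter p).count s = if p s then keys.count s else 0 := by
  induction keys with
  | nil => simp
  | cons k keys ih =>
    by_cases hks : k = s
    · subst hks
      by_cases hp : p k <;> simp [hp, ih]
    · by_cases hp : p k <;> simp [hp, hks, ih]

lemma pvKnown_perm (keys : List String) :
    (CANONICAL_COLOR_ORDER.flatMap (fun c => List.replicate (keys.count c) c)).Perm
      (keys.filter (fun k => pvOrderIndex.contains k)) := by
  rw [List.perm_iff_count]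
  intro s
  rw [pvCount_flatMap keys CANONICAL_COLOR_ORDER (by decide) s,
      pvCount_filter keys (fun k => pvOrderIndex.contains k) s]
  by_cases hs : s ∈ CANONICAL_COLOR_ORDER
  · simp [hs, (pvContains_iff s).mpr hs]
  · have : pvOrderIndex.contains s ≠ true := fun h => hs ((pvContains_iff s).mp h)
    simp [hs, this]

lemma pvB_perm_keys (keys : List String) : (ordered_color_keys_py_alt keys).Perm keys := by
  rw [pvB_eq]
  have hfilter : (fun k => !(CANONICAL_COLOR_ORDER.contains k)) = (fun k => !pvOrderIndex.contains k) := by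
    funext k
    by_cases h : k ∈ CANONICAL_COLOR_ORDER
    · simp [h, (pvContains_iff k).mpr h]
    · have : pvOrderIndex.contains k ≠ true := fun hc => h ((pvContains_iff k).mp hc)
      simp [h, this]
  rw [hfilter]
  refine List.Perm.trans (List.Perm.append (pvKnown_perm keys) (PySem.List.sorted_perm ..)) ?_
  exact List.filter_append_perm _ keys

lemma pvA_perm_keys (keys : List String) : (ordered_color_keys_py keys).Perm keys := by
  rw [pvA_eq]
  refine List.Perm.trans (List.Perm.append (PySem.List.sorted_perm ..) (PySem.List.sorted_perm ..)) ?_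
  exact List.filter_append_perm _ keys

lemma pvA_pairwise (keys : List String) :
    (ordered_color_keys_py keys).Pairwise (fun a b => pvKey a ≤ pvKey b) := by
  rw [pvA_eq, List.pairwise_append]
  refine ⟨?_, ?_, ?_⟩
  · refine (PySem.List.sorted_pairwise _ _).imp_of_mem ?_
    intro a b ha hb hle
    have ha' : pvOrderIndex.contains a = true :=
      (List.mem_filter.mp ((PySem.List.mem_sorted ..).mp ha)).2
    have hb' : pvOrderIndex.contains b = true :=
      (List.mem_filter.mp ((PySem.List.mem_sorted ..).mp hb)).2
    rw [pvGetD_zero_eq a ha', pvGetD_zero_eq b hb'] at hle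
    rcases lt_or_eq_of_le hle with h | h
    · exact pvKey_le_of a b (Or.inl h)
    · exact le_of_eq (congrArg pvKey (pvGetD_inj a b ha' hb' h))
  · refine (PySem.List.sorted_pairwise _ _).imp_of_mem ?_
    intro a b ha hb hle
    have ha' : pvOrderIndex.contains a = false := by
      simpa using (List.mem_filter.mp ((PySem.List.mem_sorted ..).mp ha)).2
    have hb' : pvOrderIndex.contains b = false := by
      simpa using (List.mem_filter.mp ((PySem.List.mem_sorted ..).mp hb)).2
    exact pvKey_le_of a b (Or.inr ⟨by rw [pvGetD_eq_six a ha', pvGetD_eq_six b hb'], hle⟩)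
  · intro a ha b hb
    have ha' : pvOrderIndex.contains a = true :=
      (List.mem_filter.mp ((PySem.List.mem_sorted ..).mp ha)).2
    have hb' : pvOrderIndex.contains b = false := by
      have := (List.mem_filter.mp ((PySem.List.mem_sorted ..).mp hb)).2
      simpa using this
    refine pvKey_le_of a b (Or.inl ?_)
    rw [pvGetD_eq_six b hb']
    exact pvGetD_lt_six a ha'

lemma pvB_pairwise (keys : List String) :
    (ordered_color_keys_py_alt keys).Pairwise (fun a b => pvKey a ≤ pvKey b) := by
  rw [pvB_eq, List.pairwise_append]
  refine ⟨?_, ?_, ?_⟩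
  · -- flatMap of replicate blocks, blocks ordered by canonical position
    rw [List.flatMap_def, List.pairwise_flatten]
    refine ⟨?_, ?_⟩
    · intro l hl
      rcases List.mem_map.mp hl with ⟨c, _, rfl⟩
      exact List.pairwise_replicate.mpr (Or.inr le_rfl)
    · rw [List.pairwise_map]
      have hpw : CANONICAL_COLOR_ORDER.Pairwise (fun c d => pvKey c ≤ pvKey d) := by decide
      refine hpw.imp_of_mem ?_
      intro c d _ _ hcd x hx y hy
      rw [(List.eq_of_mem_replicate hx : x = c), (List.eq_of_mem_replicate hy : y = d)]
      exact hcd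
  · refine (PySem.List.sorted_pairwise _ _).imp_of_mem ?_
    intro a b ha hb hle
    have ha0 : ¬ a ∈ CANONICAL_COLOR_ORDER := by
      have := (List.mem_filter.mp ((PySem.List.mem_sorted ..).mp ha)).2
      simpa using this
    have hb0 : ¬ b ∈ CANONICAL_COLOR_ORDER := by
      have := (List.mem_filter.mp ((PySem.List.mem_sorted ..).mp hb)).2
      simpa using this
    have ha' : pvOrderIndex.contains a = false := by
      by_contra h
      exact ha0 ((pvContains_iff a).mp (by revert h; cases pvOrderIndex.contains a <;> simp))
    have hb' : pvOrderIndex.contains b = false := by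
      by_contra h
      exact hb0 ((pvContains_iff b).mp (by revert h; cases pvOrderIndex.contains b <;> simp))
    exact pvKey_le_of a b (Or.inr ⟨by rw [pvGetD_eq_six a ha', pvGetD_eq_six b hb'], hle⟩)
  · intro a ha b hb
    have ha0 : a ∈ CANONICAL_COLOR_ORDER := by
      rcases List.mem_flatMap.mp ha with ⟨c, hc, hac⟩
      rw [List.eq_of_mem_replicate hac]; exact hc
    have hb0 : ¬ b ∈ CANONICAL_COLOR_ORDER := by
      have := (List.mem_filter.mp ((PySem.List.mem_sorted ..).mp hb)).2
      simpa using this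
    have hb' : pvOrderIndex.contains b = false := by
      by_contra h
      exact hb0 ((pvContains_iff b).mp (by revert h; cases pvOrderIndex.contains b <;> simp))
    refine pvKey_le_of a b (Or.inl ?_)
    rw [pvGetD_eq_six b hb']
    exact pvGetD_lt_six a ((pvContains_iff a).mpr ha0)

-- ===== VERDICT (by name: the statement is the Claim_ definition above) =====
theorem ordered_color_keys_py_spec : Claim_equal_ordered_color_keys_py := by
  intro keys _
  show ordered_color_keys_py keys = ordered_color_keys_py_alt keys
  exact PySem.List.eq_of_perm_of_pairwise_le_of_injective pvKey pvKey_injective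
    ((pvA_perm_keys keys).trans (pvB_perm_keys keys).symm)
    (pvA_pairwise keys) (pvB_pairwise keys)
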